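-- pv_equiv track=rewrite | github.com/animeshokhade/dsa | scaler/Subarrays with Bitwise OR 1.py | solve
-- ===== SOURCE A (Python) =====
-- def solve(A, B):
--     ans = 0
--     lastOne = 0
--     last = 0
--
--     for index in range(A):
--         if B[index] == 1:
--             last = index + 1
--         ans += last
--
--     return ans
-- ===== SOURCE B (Python) =====
-- def solve(A, B):
--     # Complement count: all subarrays of B[:A] minus those containing no 1,
--     # the latter summed over maximal runs of elements != 1.
--     n = max(A, 0)
--     total = n * (n + 1) // 2
--     run = 0
--     for x in B[:n]:
--         if x == 1:
--             total -= run * (run + 1) // 2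
--             run = 0
--         else:
--             run += 1
--     total -= run * (run + 1) // 2
--     return total
-- ===== Notes on version B (the rewrite author's own statement) =====
-- stated objective: alternative
-- what changed: B counts by complement: total subarrays n*(n+1)//2 minus, per maximal run of consecutive non-1 elements, run*(run+1)//2, instead of A's running 'position after last 1' accumulator.
import Mathlib
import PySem

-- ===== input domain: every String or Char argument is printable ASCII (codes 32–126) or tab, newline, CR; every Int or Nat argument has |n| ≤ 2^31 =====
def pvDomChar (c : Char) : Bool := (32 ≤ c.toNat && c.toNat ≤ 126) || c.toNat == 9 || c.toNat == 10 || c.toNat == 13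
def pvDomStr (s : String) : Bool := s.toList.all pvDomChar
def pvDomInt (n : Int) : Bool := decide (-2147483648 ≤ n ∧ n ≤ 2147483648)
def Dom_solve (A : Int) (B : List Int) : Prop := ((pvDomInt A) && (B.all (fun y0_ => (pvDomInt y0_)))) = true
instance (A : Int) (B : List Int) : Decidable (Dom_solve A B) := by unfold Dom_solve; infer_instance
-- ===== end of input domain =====

-- B counts by complement (all subarrays minus the 1-free ones, per maximal non-1 run) instead of A's running last-1 accumulator; alternative decomposition, same cost.

-- ===== PORT A =====
-- pyGetD is exact here: Pre_solve guarantees every index 0 ≤ index < A is in range.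
def solve (A : Int) (B : List Int) : Int :=
  ((PySem.List.pyRange 0 A 1).foldl
    (fun (st : Int × Int) index =>
      let last := if PySem.List.pyGetD B index 0 = 1 then index + 1 else st.2
      (st.1 + last, last))
    (0, 0)).1

-- ===== PORT B =====
def solve_alt (A : Int) (B : List Int) : Int :=
  let n : Int := max A 0
  let total : Int := PySem.Int.floordiv (n * (n + 1)) 2
  let st := (PySem.List.slice B none (some n)).foldl
    (fun (st : Int × Int) x =>
      if x = 1 then (st.1 - PySem.Int.floordiv (st.2 * (st.2 + 1)) 2, 0)
      else (st.1, st.2 + 1))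
    (total, 0)
  st.1 - PySem.Int.floordiv (st.2 * (st.2 + 1)) 2

-- ===== PRECONDITION & SPEC =====
-- Python A raises IndexError exactly when A > len(B); those inputs are excluded.
def Pre_solve (A : Int) (B : List Int) : Prop := A ≤ (B.length : Int)
instance (A : Int) (B : List Int) : Decidable (Pre_solve A B) := by unfold Pre_solve; infer_instance
def pvWitness_solve : Int × List Int := (3, [2, 1, 0])

def Spec_solve (A : Int) (B : List Int) (out : Int) : Prop := out = solve_alt A B
instance (A : Int) (B : List Int) (out : Int) : Decidable (Spec_solve A B out) := by unfold Spec_solve; infer_instance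

-- ===== CLAIM (what is proved, stated in full; the proofs are below) =====
def Claim_equal_solve : Prop := ∀ (A : Int) (B : List Int), Dom_solve A B → Pre_solve A B → Spec_solve A B (solve A B)
-- ===== LEMMAS AND PROOFS =====

-- triangular number as the ports compute it
def pvT (r : Int) : Int := PySem.Int.floordiv (r * (r + 1)) 2

theorem pvT_exact (r : Int) : 2 * pvT r = r * (r + 1) := by
  obtain ⟨k, hk⟩ := Int.even_mul_succ_self r
  have hk2 : r * (r + 1) = 2 * k := by omega
  have : PySem.Int.floordiv (r * (r + 1)) 2 = k := by
    rw [hk2, PySem.Int.floordiv_eq_iff_of_pos (by omega)]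
    omega
  simp [pvT, hk2]

theorem pvT_succ (r : Int) : pvT (r + 1) = pvT r + (r + 1) := by
  have h1 := pvT_exact r
  have h2 := pvT_exact (r + 1)
  nlinarith [h1, h2]

theorem pvT_zero : pvT 0 = 0 := by decide

-- the two loop bodies
def pvAStep (st : Int × Int) (p : Int × Int) : Int × Int :=
  let last := if p.2 = 1 then p.1 + 1 else st.2
  (st.1 + last, last)

def pvBStep (st : Int × Int) (x : Int) : Int × Int :=
  if x = 1 then (st.1 - pvT st.2, 0) else (st.1, st.2 + 1)

-- key invariant linking A's fold over enumerate to B's fold over the list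
theorem pv_key : ∀ (xs : List Int) (s a l t r : Int), l = s - r →
    ((PySem.List.enumerate xs s).foldl pvAStep (a, l)).1
      = (let st := xs.foldl pvBStep (t, r); st.1 - pvT st.2)
        + a - t + pvT r - pvT s + pvT (s + xs.length) := by
  intro xs
  induction xs with
  | nil =>
    intro s a l t r hl
    simp [PySem.List.enumerate_nil]
    omega
  | cons x xs ih =>
    intro s a l t r hl
    rw [PySem.List.enumerate_cons]
    by_cases hx : x = 1
    · have h1 : pvAStep (a, l) (s, x) = (a + s + 1, s + 1) := by
        simp [pvAStep, hx]; ring_nf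
      have h2 : pvBStep (t, r) x = (t - pvT r, 0) := by simp [pvBStep, hx]
      simp only [List.foldl_cons, h1, h2]
      rw [ih (s + 1) (a + s + 1) (s + 1) (t - pvT r) 0 (by omega)]
      simp only [List.length_cons]
      have hs := pvT_succ s
      have hz := pvT_zero
      have hlen : (s : Int) + 1 + (xs.length : Int) = s + ((xs.length : Int) + 1) := by ring
      push_cast
      push_cast at hlen
      rw [hlen]
      omega
    · have h1 : pvAStep (a, l) (s, x) = (a + l, l) := by simp [pvAStep, hx]
      have h2 : pvBStep (t, r) x = (t, r + 1) := by simp [pvBStep, hx]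
      simp only [List.foldl_cons, h1, h2]
      rw [ih (s + 1) (a + l) l t (r + 1) (by omega)]
      simp only [List.length_cons]
      have hr := pvT_succ r
      have hs := pvT_succ s
      have hlen : (s : Int) + 1 + (xs.length : Int) = s + ((xs.length : Int) + 1) := by ring
      push_cast
      push_cast at hlen
      rw [hlen]
      omega

-- ===== VERDICT (by name: the statement is the Claim_ definition above) =====
theorem solve_spec : Claim_equal_solve := by
  intro A B _ hpre
  unfold Spec_solve solve solve_alt Pre_solve at *
  by_cases hA : A ≤ 0
  · have hmax : max A 0 = 0 := by omega
    rw [PySem.List.pyRange_one_eq_nil hA]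
    simp only [List.foldl_nil, hmax]
    rw [PySem.List.slice_to B (le_refl 0)]
    simp only [Int.toNat_zero, List.take_zero, List.foldl_nil]
    decide
  · have hA0 : 0 ≤ A := by omega
    set n : Nat := A.toNat with hn
    have hAn : A = (n : Int) := by omega
    have hnB : n ≤ B.length := by omega
    set xs : List Int := B.take n with hxs
    have hlen : xs.length = n := by simp [hxs, hnB]
    have hmax : max A 0 = A := by omega
    -- B side: slice is xs
    have hslice : PySem.List.slice B none (some (max A 0)) = xs := by
      rw [hmax, hAn, PySem.List.slice_to B (by omega : (0:Int) ≤ (n : Int))]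
      simp [hxs]
    -- A side: replace pyGetD B by pyGetD xs, then fold over enumerate
    have hcongr : (PySem.List.pyRange 0 A 1).foldl
        (fun (st : Int × Int) index =>
          let last := if PySem.List.pyGetD B index 0 = 1 then index + 1 else st.2
          (st.1 + last, last)) (0, 0)
      = (PySem.List.pyRange 0 A 1).foldl
        (fun (st : Int × Int) index => pvAStep st (index, PySem.List.pyGetD xs index 0)) (0, 0) := by
      apply PySem.List.foldl_congr_mem
      intro acc i hi
      have hi' := (PySem.List.mem_pyRange_one).1 hi
      have h0i : 0 ≤ i := hi'.1
      have hiA : i < A := hi'.2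
      have hik : i.toNat < n := by omega
      have hikB : i.toNat < B.length := by omega
      have : PySem.List.pyGetD B i 0 = PySem.List.pyGetD xs i 0 := by
        rw [PySem.List.pyGetD_of_nonneg B 0 h0i, PySem.List.pyGetD_of_nonneg xs 0 h0i]
        rw [List.getD_eq_getElem B 0 hikB, List.getD_eq_getElem xs 0 (by omega)]
        simp only [hxs]
        rw [List.getElem_take]
      simp [pvAStep, this]
    have henum : PySem.List.enumerate xs 0
        = (PySem.List.pyRange 0 (PySem.List.len xs) 1).map
            (fun j => (j, PySem.List.pyGetD xs j 0)) :=
      PySem.List.enumerate_eq_map_pyRange xs 0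
    have hfold : (PySem.List.pyRange 0 A 1).foldl
        (fun (st : Int × Int) index => pvAStep st (index, PySem.List.pyGetD xs index 0)) (0, 0)
      = (PySem.List.enumerate xs 0).foldl pvAStep (0, 0) := by
      rw [henum, List.foldl_map]
      have : PySem.List.len xs = A := by simp [PySem.List.len, hlen, hAn]
      rw [this]
    rw [hcongr, hfold]
    have hbs : (fun (st : Int × Int) x =>
          if x = 1 then (st.1 - PySem.Int.floordiv (st.2 * (st.2 + 1)) 2, 0)
          else (st.1, st.2 + 1)) = pvBStep := by
      funext st x; simp [pvBStep, pvT]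
    have hslice' : PySem.List.slice B none (some A) = xs := by
      rw [hAn, PySem.List.slice_to B (by omega : (0:Int) ≤ (n : Int))]
      simp [hxs]
    simp only [hmax, hbs, hslice']
    rw [pv_key xs 0 0 0 (pvT A) 0 (by omega)]
    have hz := pvT_zero
    have hxA : ((xs.length : Int)) = A := by omega
    have hTA : PySem.Int.floordiv (A * (A + 1)) 2 = pvT A := rfl
    simp only [zero_add, hxA, hz, hTA]
    set p := xs.foldl pvBStep (pvT A, 0) with hp
    show p.1 - pvT p.2 + 0 - pvT A + pvT 0 - 0 + pvT A = p.1 - PySem.Int.floordiv (p.2 * (p.2 + 1)) 2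
    have : PySem.Int.floordiv (p.2 * (p.2 + 1)) 2 = pvT p.2 := rfl
    rw [this, hz]
    ring
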